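-- pv_equiv track=rewrite | github.com/chuegue/AoC2024 | day2/main.py | check_descending2
-- ===== SOURCE A (Python) =====
-- def check_descending(arr):
--     for i in range(1, len(arr)):
--         if arr[i] >= arr[i-1] or arr[i] - arr[i-1] < -3:
--             return 0
--     return 1
--
-- def check_descending2(arr):
--     if check_descending(arr) == 0:
--         for i in range(len(arr)):
--             arrcpy = arr.copy()
--             arrcpy.pop(i)
--             if check_descending(arrcpy) == 1:
--                 return 1
--         return 0
--     else:
--         return 1
-- ===== SOURCE B (Python) =====
-- def _good(a, b):
--     return b < a and a - b <= 3
--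
--
-- def _valid(arr):
--     return all(_good(a, b) for a, b in zip(arr, arr[1:]))
--
--
-- def _first_bad(arr):
--     for i in range(1, len(arr)):
--         if not _good(arr[i - 1], arr[i]):
--             return i
--     return None
--
--
-- def check_descending2(arr):
--     # Only removing one endpoint of the first bad adjacent pair can fix the
--     # sequence, so just two O(n) re-checks are needed instead of n of them.
--     j = _first_bad(arr)
--     if j is None:
--         return 1
--     for k in (j - 1, j):
--         if _valid(arr[:k] + arr[k + 1:]):
--             return 1
--     return 0
-- ===== Notes on version B (the rewrite author's own statement) =====
-- stated objective: faster
-- what changed: Instead of re-validating the whole array after popping each of the n indices, B finds the first bad adjacent pair once and re-checks only the two removals that can break that pair, so the quadratic scan of n popped copies disappears.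
import Mathlib
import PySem

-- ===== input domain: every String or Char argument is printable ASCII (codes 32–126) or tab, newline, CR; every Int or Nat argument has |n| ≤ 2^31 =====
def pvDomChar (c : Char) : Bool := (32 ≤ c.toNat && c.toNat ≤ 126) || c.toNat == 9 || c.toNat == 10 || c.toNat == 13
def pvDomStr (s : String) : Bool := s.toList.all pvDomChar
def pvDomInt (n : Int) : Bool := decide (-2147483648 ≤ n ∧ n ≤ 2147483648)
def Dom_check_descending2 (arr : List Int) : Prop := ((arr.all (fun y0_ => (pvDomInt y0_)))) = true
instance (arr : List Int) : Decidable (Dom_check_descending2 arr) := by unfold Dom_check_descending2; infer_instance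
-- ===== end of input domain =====

-- B finds the first bad adjacent pair once and checks only the two removals that can fix it (O(n) vs A's O(n^2)).


-- ===== PORT A =====
-- inner loop of check_descending over the indices of range(1, len(arr));
-- every index i satisfies 1 ≤ i < len(arr), so arr[i] / arr[i-1] never raise and pyGetD is exact
def pvCdLoop (arr : List Int) : List Int → Int
  | [] => 1
  | i :: rest =>
    if PySem.List.pyGetD arr (i - 1) 0 ≤ PySem.List.pyGetD arr i 0 ∨
        PySem.List.pyGetD arr i 0 - PySem.List.pyGetD arr (i - 1) 0 < -3 then 0
    else pvCdLoop arr rest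

def pvCheckDescending (arr : List Int) : Int :=
  pvCdLoop arr (PySem.List.pyRange 1 arr.length 1)

-- outer loop of check_descending2 over range(len(arr)); i is always a valid index so pop never raises
def pvCd2Loop (arr : List Int) : List Int → Int
  | [] => 0
  | i :: rest =>
    let arrcpy := ((PySem.List.pop? arr i).map Prod.snd).getD []
    if pvCheckDescending arrcpy = 1 then 1 else pvCd2Loop arr rest

def check_descending2 (arr : List Int) : Int :=
  if pvCheckDescending arr = 0 then pvCd2Loop arr (PySem.List.pyRange 0 arr.length 1)
  else 1

-- ===== PORT B =====
def pvGoodB (a b : Int) : Bool := b < a && a - b ≤ 3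

-- all(_good(a, b) for a, b in zip(arr, arr[1:]))
def pvValidB (l : List Int) : Bool :=
  (l.zip (PySem.List.slice l (some 1) none)).all fun p => pvGoodB p.1 p.2

-- _first_bad's loop; indices from range(1, len(arr)) are always in range
def pvFbLoop (arr : List Int) : List Int → Option Int
  | [] => none
  | i :: rest =>
    if !(pvGoodB (PySem.List.pyGetD arr (i - 1) 0) (PySem.List.pyGetD arr i 0)) then some i
    else pvFbLoop arr rest

def pvFirstBad (arr : List Int) : Option Int :=
  pvFbLoop arr (PySem.List.pyRange 1 arr.length 1)

-- for k in (j - 1, j): if _valid(arr[:k] + arr[k+1:]): return 1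
def pvTryLoop (arr : List Int) : List Int → Int
  | [] => 0
  | k :: rest =>
    if pvValidB (PySem.List.slice arr none (some k) ++ PySem.List.slice arr (some (k + 1)) none) then 1
    else pvTryLoop arr rest

def check_descending2_alt (arr : List Int) : Int :=
  match pvFirstBad arr with
  | none => 1
  | some j => pvTryLoop arr [j - 1, j]

-- ===== PRECONDITION & SPEC =====
def Spec_check_descending2 (arr : List Int) (out : Int) : Prop := out = check_descending2_alt arr
instance (arr : List Int) (out : Int) : Decidable (Spec_check_descending2 arr out) := by unfold Spec_check_descending2; infer_instance

-- ===== CLAIM (what is proved, stated in full; the proofs are below) =====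
def Claim_equal_check_descending2 : Prop := ∀ (arr : List Int), Dom_check_descending2 arr → Spec_check_descending2 arr (check_descending2 arr)

-- ===== LEMMAS AND PROOFS =====

-- the array with index k removed, as A's pop and B's slice-concatenation both produce it
def pvE (arr : List Int) (k : Nat) : List Int := arr.take k ++ arr.drop (k + 1)

-- "every adjacent pair is good", by (Nat) index
def pvValid (l : List Int) : Prop :=
  ∀ k : Nat, k + 1 < l.length → pvGoodB (l.getD k 0) (l.getD (k + 1) 0) = true

theorem pvCdLoop_cases (arr l : List Int) : pvCdLoop arr l = 0 ∨ pvCdLoop arr l = 1 := by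
  induction l with
  | nil => right; rfl
  | cons i rest ih =>
    simp only [pvCdLoop]
    split_ifs with h
    · left; rfl
    · exact ih

theorem pvCdLoop_eq_one_iff (arr l : List Int) :
    pvCdLoop arr l = 1 ↔
      ∀ i ∈ l, pvGoodB (PySem.List.pyGetD arr (i - 1) 0) (PySem.List.pyGetD arr i 0) = true := by
  induction l with
  | nil => simp [pvCdLoop]
  | cons i rest ih =>
    simp only [pvCdLoop]
    split_ifs with h
    · constructor
      · intro hc; exact absurd hc (by norm_num)
      · intro hall
        have := hall i (List.mem_cons_self ..)
        simp only [pvGoodB, Bool.and_eq_true, decide_eq_true_eq] at this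
        omega
    · have hg : pvGoodB (PySem.List.pyGetD arr (i - 1) 0) (PySem.List.pyGetD arr i 0) = true := by
        simp only [pvGoodB, Bool.and_eq_true, decide_eq_true_eq]
        push Not at h
        omega
      rw [ih, List.forall_mem_cons, hg]
      simp

theorem pvFbLoop_eq_none_iff (arr l : List Int) :
    pvFbLoop arr l = none ↔
      ∀ i ∈ l, pvGoodB (PySem.List.pyGetD arr (i - 1) 0) (PySem.List.pyGetD arr i 0) = true := by
  induction l with
  | nil => simp [pvFbLoop]
  | cons i rest ih =>
    simp only [pvFbLoop]
    split_ifs with h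
    · simp only [Bool.not_eq_eq_eq_not] at h
      constructor
      · intro hc; exact absurd hc (by simp)
      · intro hall
        have := hall i (List.mem_cons_self ..)
        rw [this] at h
        exact absurd h (by simp)
    · simp only [Bool.not_eq_eq_eq_not, Bool.not_true] at h
      rw [ih, List.forall_mem_cons]
      simp only [iff_and_self]
      intro _
      cases hgb : pvGoodB (PySem.List.pyGetD arr (i - 1) 0) (PySem.List.pyGetD arr i 0)
      · exact absurd hgb h
      · rfl

theorem pvCd_one_iff_fb_none (arr : List Int) :
    pvCheckDescending arr = 1 ↔ pvFirstBad arr = none := by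
  unfold pvCheckDescending pvFirstBad
  rw [pvCdLoop_eq_one_iff, pvFbLoop_eq_none_iff]

theorem pvCd_cases (arr : List Int) : pvCheckDescending arr = 0 ∨ pvCheckDescending arr = 1 :=
  pvCdLoop_cases arr _

theorem pvCd2Loop_cases (arr l : List Int) : pvCd2Loop arr l = 0 ∨ pvCd2Loop arr l = 1 := by
  induction l with
  | nil => left; rfl
  | cons i rest ih =>
    simp only [pvCd2Loop]
    split_ifs with h
    · right; rfl
    · exact ih

theorem pvCd2Loop_eq_one_iff (arr l : List Int) :
    pvCd2Loop arr l = 1 ↔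
      ∃ i ∈ l, pvCheckDescending (((PySem.List.pop? arr i).map Prod.snd).getD []) = 1 := by
  induction l with
  | nil => simp [pvCd2Loop]
  | cons i rest ih =>
    simp only [pvCd2Loop]
    split_ifs with h
    · simp only [true_iff]
      exact ⟨i, List.mem_cons_self .., h⟩
    · rw [ih]
      constructor
      · rintro ⟨x, hx, hcx⟩; exact ⟨x, List.mem_cons_of_mem _ hx, hcx⟩
      · rintro ⟨x, hx, hcx⟩
        rcases List.mem_cons.mp hx with rfl | hx'
        · exact absurd hcx h
        · exact ⟨x, hx', hcx⟩

theorem pvFbLoop_some_range (arr : List Int) :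
    ∀ (m : Nat) (a j : Int), m = ((arr.length : Int) - a).toNat →
      pvFbLoop arr (PySem.List.pyRange a arr.length 1) = some j →
      a ≤ j ∧ j < arr.length ∧
        pvGoodB (PySem.List.pyGetD arr (j - 1) 0) (PySem.List.pyGetD arr j 0) = false ∧
        ∀ i : Int, a ≤ i → i < j →
          pvGoodB (PySem.List.pyGetD arr (i - 1) 0) (PySem.List.pyGetD arr i 0) = true := by
  intro m
  induction m with
  | zero =>
    intro a j hm hfb
    rw [PySem.List.pyRange_one_eq_nil (by omega)] at hfb
    simp [pvFbLoop] at hfb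
  | succ m ih =>
    intro a j hm hfb
    by_cases hab : (arr.length : Int) ≤ a
    · rw [PySem.List.pyRange_one_eq_nil hab] at hfb
      simp [pvFbLoop] at hfb
    · rw [PySem.List.pyRange_one_cons (by omega)] at hfb
      simp only [pvFbLoop] at hfb
      split_ifs at hfb with h
      · obtain rfl : a = j := Option.some.inj hfb
        simp only [Bool.not_eq_eq_eq_not, Bool.not_true] at h
        exact ⟨le_refl _, by omega, by simpa using h, fun i h1 h2 => absurd h2 (by omega)⟩
      · obtain ⟨h1, h2, h3, h4⟩ := ih (a + 1) j (by omega) hfb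
        refine ⟨by omega, h2, h3, fun i hi1 hi2 => ?_⟩
        by_cases hia : i = a
        · subst hia
          simp only [Bool.not_eq_eq_eq_not, Bool.not_true] at h
          cases hgb : pvGoodB (PySem.List.pyGetD arr (i - 1) 0) (PySem.List.pyGetD arr i 0)
          · exact absurd hgb h
          · rfl
        · exact h4 i (by omega) hi2

theorem pvValidB_cons₂ (a b : Int) (t : List Int) :
    pvValidB (a :: b :: t) = (pvGoodB a b && pvValidB (b :: t)) := by
  simp [pvValidB, PySem.List.slice_from_one]

theorem pvValidB_iff (l : List Int) : pvValidB l = true ↔ pvValid l := by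
  induction l with
  | nil =>
    simp only [pvValidB, PySem.List.slice_from_one]
    constructor
    · intro _ k hk; simp at hk
    · intro _; rfl
  | cons a l ih =>
    cases l with
    | nil =>
      simp only [pvValidB, PySem.List.slice_from_one]
      constructor
      · intro _ k hk; simp at hk
      · intro _; rfl
    | cons b t =>
      rw [pvValidB_cons₂, Bool.and_eq_true, ih]
      constructor
      · rintro ⟨hg, hv⟩ k hk
        cases k with
        | zero => simpa using hg
        | succ k =>
          have := hv k (by simp at hk ⊢; omega)
          simpa using this
      · intro hv
        refine ⟨by simpa using hv 0 (by simp), fun k hk => ?_⟩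
        have := hv (k + 1) (by simp at hk ⊢; omega)
        simpa using this

theorem pvCd_one_iff_valid (l : List Int) : pvCheckDescending l = 1 ↔ pvValid l := by
  unfold pvCheckDescending
  rw [pvCdLoop_eq_one_iff]
  constructor
  · intro h k hk
    have hmem : ((k + 1 : Nat) : Int) ∈ PySem.List.pyRange 1 l.length 1 := by
      rw [PySem.List.mem_pyRange_one]; omega
    have := h _ hmem
    have e1 : ((k + 1 : Nat) : Int) - 1 = ((k : Nat) : Int) := by push_cast; ring
    rw [e1, PySem.List.pyGetD_natCast, PySem.List.pyGetD_natCast] at this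
    exact this
  · intro h i hi
    rw [PySem.List.mem_pyRange_one] at hi
    obtain ⟨hi1, hi2⟩ := hi
    obtain ⟨k, hk⟩ : ∃ k : Nat, i = ((k + 1 : Nat) : Int) := ⟨(i - 1).toNat, by omega⟩
    have e1 : i - 1 = ((k : Nat) : Int) := by omega
    rw [e1, hk, PySem.List.pyGetD_natCast, PySem.List.pyGetD_natCast]
    exact h k (by omega)

theorem pvE_length (arr : List Int) (k : Nat) (h : k < arr.length) :
    (pvE arr k).length = arr.length - 1 := by
  simp [pvE]; omega

theorem pvE_getD (arr : List Int) (k m : Nat) (hk : k < arr.length) (hm : m + 1 < arr.length) :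
    (pvE arr k).getD m 0 = if m < k then arr.getD m 0 else arr.getD (m + 1) 0 := by
  simp only [pvE, List.getD_eq_getElem?_getD]
  rw [List.getElem?_append]
  split_ifs with h1 h2 h2
  · rw [List.getElem?_take_of_lt h2]
  · simp [List.length_take] at h1; omega
  · simp [List.length_take] at h1; omega
  · rw [List.getElem?_drop]
    simp only [List.length_take] at *
    congr 2
    omega

theorem pvNot_valid_pvE (arr : List Int) (jn i : Nat) (hj1 : 1 ≤ jn) (hjn : jn < arr.length)
    (hbad : pvGoodB (arr.getD (jn - 1) 0) (arr.getD jn 0) = false)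
    (hi : i < arr.length) (hne1 : i ≠ jn - 1) (hne2 : i ≠ jn) :
    ¬ pvValid (pvE arr i) := by
  intro hv
  by_cases hlt : jn < i
  · have h1 := hv (jn - 1) (by rw [pvE_length _ _ hi]; omega)
    rw [pvE_getD _ _ _ hi (by omega), pvE_getD _ _ _ hi (by omega)] at h1
    rw [if_pos (by omega), if_pos (by omega)] at h1
    have e1 : jn - 1 + 1 = jn := by omega
    rw [e1] at h1
    rw [hbad] at h1
    exact absurd h1 (by simp)
  · -- here i ≤ jn - 2, so the bad pair sits at positions jn-2, jn-1 of pvE arr i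
    have hile : i + 2 ≤ jn := by omega
    have h1 := hv (jn - 2) (by rw [pvE_length _ _ hi]; omega)
    rw [pvE_getD _ _ _ hi (by omega), pvE_getD _ _ _ hi (by omega)] at h1
    rw [if_neg (by omega), if_neg (by omega)] at h1
    have e1 : jn - 2 + 1 = jn - 1 := by omega
    have e2 : jn - 1 + 1 = jn := by omega
    rw [e1, e2] at h1
    rw [hbad] at h1
    exact absurd h1 (by simp)

theorem pvPopped_eq_pvE (arr : List Int) (k : Nat) (h : k < arr.length) :
    ((PySem.List.pop? arr (k : Int)).map Prod.snd).getD [] = pvE arr k := by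
  rw [PySem.List.pop?_natCast arr k h]
  simp [pvE, List.eraseIdx_eq_take_drop_succ]

theorem pvCut_eq_pvE (arr : List Int) (k : Int) (h0 : 0 ≤ k) :
    PySem.List.slice arr none (some k) ++ PySem.List.slice arr (some (k + 1)) none =
      pvE arr k.toNat := by
  rw [PySem.List.slice_to arr h0, PySem.List.slice_from arr (by omega)]
  unfold pvE
  congr 1
  congr 1
  omega

-- ===== VERDICT (by name: the statement is the Claim_ definition above) =====
theorem check_descending2_spec : Claim_equal_check_descending2 := by
  intro arr _
  unfold Spec_check_descending2 check_descending2 check_descending2_alt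
  cases hfb : pvFirstBad arr with
  | none =>
    have h1 : pvCheckDescending arr = 1 := (pvCd_one_iff_fb_none arr).mpr hfb
    rw [h1]
    norm_num
  | some j =>
    have h0 : pvCheckDescending arr = 0 := by
      rcases pvCd_cases arr with h | h
      · exact h
      · rw [(pvCd_one_iff_fb_none arr).mp h] at hfb; exact absurd hfb (by simp)
    rw [if_pos h0]
    obtain ⟨hj1, hj2, hbad, hmin⟩ :=
      pvFbLoop_some_range arr ((arr.length : Int) - 1).toNat 1 j rfl hfb
    set jn := j.toNat with hjndef
    have hj1' : 1 ≤ jn := by omega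
    have hj2' : jn < arr.length := by omega
    have hbadN : pvGoodB (arr.getD (jn - 1) 0) (arr.getD jn 0) = false := by
      have e1 : j - 1 = (((jn - 1 : Nat)) : Int) := by omega
      have e2 : j = ((jn : Nat) : Int) := by omega
      rw [e1, e2, PySem.List.pyGetD_natCast, PySem.List.pyGetD_natCast] at hbad
      exact hbad
    have hA : pvCd2Loop arr (PySem.List.pyRange 0 arr.length 1) = 1 ↔
        (pvValid (pvE arr (jn - 1)) ∨ pvValid (pvE arr jn)) := by
      rw [pvCd2Loop_eq_one_iff]
      constructor
      · rintro ⟨i, hi, hck⟩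
        rw [PySem.List.mem_pyRange_one] at hi
        obtain ⟨k, rfl⟩ : ∃ k : Nat, i = (k : Int) := ⟨i.toNat, by omega⟩
        have hklen : k < arr.length := by exact_mod_cast hi.2
        rw [pvPopped_eq_pvE arr k hklen] at hck
        have hv := (pvCd_one_iff_valid _).mp hck
        by_cases e1 : k = jn - 1
        · left; rwa [e1] at hv
        by_cases e2 : k = jn
        · right; rwa [e2] at hv
        exact absurd hv (pvNot_valid_pvE arr jn k hj1' hj2' hbadN hklen e1 e2)
      · intro h
        rcases h with h | h
        · refine ⟨(((jn - 1 : Nat)) : Int), ?_, ?_⟩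
          · rw [PySem.List.mem_pyRange_one]; omega
          · rw [pvPopped_eq_pvE arr (jn - 1) (by omega)]
            exact (pvCd_one_iff_valid _).mpr h
        · refine ⟨((jn : Nat) : Int), ?_, ?_⟩
          · rw [PySem.List.mem_pyRange_one]; omega
          · rw [pvPopped_eq_pvE arr jn (by omega)]
            exact (pvCd_one_iff_valid _).mpr h
    simp only [pvTryLoop]
    rw [pvCut_eq_pvE arr (j - 1) (by omega), pvCut_eq_pvE arr j (by omega)]
    have ej1 : (j - 1).toNat = jn - 1 := by omega
    rw [ej1]
    split_ifs with h1 h2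
    · exact hA.mpr (Or.inl ((pvValidB_iff _).mp h1))
    · exact hA.mpr (Or.inr ((pvValidB_iff _).mp h2))
    · rcases pvCd2Loop_cases arr (PySem.List.pyRange 0 arr.length 1) with h | h
      · exact h
      · rcases hA.mp h with hv | hv
        · exact absurd ((pvValidB_iff _).mpr hv) h1
        · exact absurd ((pvValidB_iff _).mpr hv) h2
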